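-- pv_equiv track=rewrite | github.com/sxzhang25/product-manifold-learning | utils.py | get_product_eigs
-- ===== SOURCE A (Python) =====
-- def get_product_eigs(manifolds, n_eigenvectors):
--   '''
--   returns the a list of product eigenvectors out of the first n_eigenvectors,
--   given a manifold factorization
--   manifolds: a list of lists, each sublist contains the indices of factor
--              eigenvectors corresponding to a manifold factor
--   n_eigenvectors: the number of eigenvectors
--   '''
--   mixtures = []
--   for i in range(1, n_eigenvectors):
--     is_mixture = True
--     for manifold in manifolds:
--       if i in manifold:
--         is_mixture = False
--     if is_mixture:
--       mixtures.append(i)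
--
--   return mixtures
-- ===== SOURCE B (Python) =====
-- def get_product_eigs(manifolds, n_eigenvectors):
--   # eliminate instead of test: start from all candidates, discard factor indices
--   mixtures = set(range(1, n_eigenvectors))
--   for manifold in manifolds:
--     for idx in manifold:
--       mixtures.discard(idx)
--   return sorted(mixtures)
-- ===== Notes on version B (the rewrite author's own statement) =====
-- stated objective: faster
-- what changed: Inverts the loop nesting: instead of testing each candidate i against every manifold with a linear 'i in manifold' scan, B starts with the full candidate set and discards every manifold index from it with O(1) set discards, then returns the sorted remainder.
import Mathlib
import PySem

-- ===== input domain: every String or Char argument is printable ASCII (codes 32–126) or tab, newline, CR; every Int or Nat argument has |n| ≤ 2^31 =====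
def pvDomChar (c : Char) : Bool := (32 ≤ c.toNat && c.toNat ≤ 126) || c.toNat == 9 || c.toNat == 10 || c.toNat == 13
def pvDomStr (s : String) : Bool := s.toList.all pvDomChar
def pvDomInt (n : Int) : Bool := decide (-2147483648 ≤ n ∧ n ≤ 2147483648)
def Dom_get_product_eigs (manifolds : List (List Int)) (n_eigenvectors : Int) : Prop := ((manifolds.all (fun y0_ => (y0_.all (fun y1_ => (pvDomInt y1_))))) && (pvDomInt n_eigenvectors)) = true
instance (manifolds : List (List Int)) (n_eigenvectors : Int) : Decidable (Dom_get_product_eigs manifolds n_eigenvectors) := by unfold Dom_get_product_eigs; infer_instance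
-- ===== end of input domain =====

-- B inverts A's loop nesting: it starts from the full candidate set and discards every manifold index, then sorts; return values proved equal.


-- ===== PORT A =====
def get_product_eigs (manifolds : List (List Int)) (n_eigenvectors : Int) : List Int :=
  (PySem.List.pyRange 1 n_eigenvectors 1).foldl (fun mixtures i =>
    let is_mixture := manifolds.foldl (fun b manifold => if manifold.contains i then false else b) true
    if is_mixture then mixtures ++ [i] else mixtures) []

-- ===== PORT B =====
def get_product_eigs_alt (manifolds : List (List Int)) (n_eigenvectors : Int) : List Int :=
  let mixtures : PySem.Set Int := PySem.Set.ofList (PySem.List.pyRange 1 n_eigenvectors 1)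
  let mixtures := manifolds.foldl (fun s manifold =>
    manifold.foldl (fun s idx => PySem.Set.discard s idx) s) mixtures
  PySem.List.sorted mixtures (fun x => x)

-- ===== PRECONDITION & SPEC =====
def Spec_get_product_eigs (manifolds : List (List Int)) (n_eigenvectors : Int) (out : List Int) : Prop := out = get_product_eigs_alt manifolds n_eigenvectors
instance (manifolds : List (List Int)) (n_eigenvectors : Int) (out : List Int) : Decidable (Spec_get_product_eigs manifolds n_eigenvectors out) := by unfold Spec_get_product_eigs; infer_instance

-- ===== CLAIM (what is proved, stated in full; the proofs are below) =====
def Claim_equal_get_product_eigs : Prop := ∀ (manifolds : List (List Int)) (n_eigenvectors : Int), Dom_get_product_eigs manifolds n_eigenvectors → Spec_get_product_eigs manifolds n_eigenvectors (get_product_eigs manifolds n_eigenvectors)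

-- ===== LEMMAS AND PROOFS =====

-- A's inner flag loop: the flag is the conjunction "no manifold contains i".
lemma flag_loop (manifolds : List (List Int)) (i : Int) (b : Bool) :
    manifolds.foldl (fun b manifold => if manifold.contains i then false else b) b
      = (b && manifolds.all (fun m => !m.contains i)) := by
  induction manifolds generalizing b with
  | nil => simp
  | cons m ms ih =>
    simp only [List.foldl_cons, List.all_cons, ih]
    cases h : m.contains i <;> simp

-- B's inner discard loop over one manifold is a filter.
lemma discard_loop (m : List Int) (s : List Int) :
    m.foldl (fun s idx => PySem.Set.discard s idx) s = s.filter (fun x => !m.contains x) := by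
  induction m generalizing s with
  | nil => simp
  | cons i ms ih =>
    rw [List.foldl_cons, ih, PySem.Set.discard, List.filter_filter]
    apply List.filter_congr
    intro x _
    simp [Bool.and_comm, Bool.beq_eq_decide_eq]

-- B's outer loop over all manifolds is a filter by "no manifold contains x".
lemma discard_loops (manifolds : List (List Int)) (s : List Int) :
    manifolds.foldl (fun s manifold => manifold.foldl (fun s idx => PySem.Set.discard s idx) s) s
      = s.filter (fun x => manifolds.all (fun m => !m.contains x)) := by
  induction manifolds generalizing s with
  | nil => simp
  | cons m ms ih =>
    rw [List.foldl_cons, discard_loop, ih, List.filter_filter]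
    apply List.filter_congr
    intro x _
    simp [List.all_cons, Bool.and_comm]

-- ===== VERDICT (by name: the statement is the Claim_ definition above) =====
theorem get_product_eigs_spec : Claim_equal_get_product_eigs := by
  intro manifolds n _
  unfold Spec_get_product_eigs get_product_eigs get_product_eigs_alt
  simp only [flag_loop, Bool.true_and]
  rw [show (fun (mixtures : List Int) i => if manifolds.all (fun m => !m.contains i) = true then mixtures ++ [i] else mixtures)
        = (fun mixtures i => if (fun j => manifolds.all (fun m => !m.contains j)) i = true then mixtures ++ [(fun (x : Int) => x) i] else mixtures) from rfl,
     PySem.List.foldl_append_if]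
  rw [PySem.Set.ofList_eq_self_of_nodup _ (PySem.List.nodup_pyRange_one 1 n), discard_loops]
  rw [PySem.List.sorted_eq_self_of_pairwise]
  · simp
  · exact ((PySem.List.pairwise_lt_pyRange_one 1 n).sublist List.filter_sublist).imp le_of_lt
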